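-- pv_equiv track=rewrite | github.com/samaresh77/09.09.2025 | Python/Projects/Number Pattern/main.py | pyramid_pattern
-- ===== SOURCE A (Python) =====
-- def pyramid_pattern(n):
--     pattern = ""
--     for i in range(1, n+1):
--         pattern += " " * (n-i)
--         for j in range(1, i+1):
--             pattern += str(j)
--         for j in range(i-1, 0, -1):
--             pattern += str(j)
--         pattern += "\n"
--     return pattern
-- ===== SOURCE B (Python) =====
-- def pyramid_pattern(n):
--     # Incremental: extend the previous row's ascending/descending digit strings
--     # by one number each iteration instead of regenerating every row from scratch.
--     rows = []
--     asc = ""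
--     desc = ""
--     for i in range(1, n + 1):
--         asc += str(i)
--         rows.append(" " * (n - i) + asc + desc + "\n")
--         desc = str(i) + desc
--     return "".join(rows)
-- ===== Notes on version B (the rewrite author's own statement) =====
-- stated objective: alternative
-- what changed: B has no inner counting loops: it maintains the ascending and descending digit strings incrementally across rows (each row extends the previous row's segments by one number) instead of regenerating both segments per row with nested loops.
import Mathlib
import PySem

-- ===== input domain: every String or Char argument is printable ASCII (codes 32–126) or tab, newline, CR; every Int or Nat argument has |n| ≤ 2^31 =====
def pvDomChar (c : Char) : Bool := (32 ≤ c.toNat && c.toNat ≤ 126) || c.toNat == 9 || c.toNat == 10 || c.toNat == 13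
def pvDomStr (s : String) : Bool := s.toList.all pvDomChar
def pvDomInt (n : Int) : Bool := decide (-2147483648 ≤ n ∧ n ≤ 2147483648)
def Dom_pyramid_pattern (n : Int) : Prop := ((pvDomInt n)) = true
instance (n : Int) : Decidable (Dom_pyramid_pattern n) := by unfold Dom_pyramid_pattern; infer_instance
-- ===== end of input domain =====

-- B replaces A's per-row nested counting loops by a single loop that keeps the
-- ascending/descending digit strings as accumulators, extending each by one
-- number per row (objective: alternative, incremental decomposition).

-- ===== PORT A =====
def pyramid_pattern (n : Int) : String :=
  (PySem.List.pyRange 1 (n+1) 1).foldl (fun pattern i =>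
    -- " " * (n-i): hand port, exact (a non-positive repeat count gives "" via .toNat)
    let p1 := pattern ++ String.ofList (List.replicate (n - i).toNat ' ')
    let p2 := (PySem.List.pyRange 1 (i+1) 1).foldl (fun p j => p ++ PySem.Int.toStr j) p1
    let p3 := (PySem.List.pyRange (i-1) 0 (-1)).foldl (fun p j => p ++ PySem.Int.toStr j) p2
    p3 ++ "\n") ""

-- ===== PORT B =====
def pyramid_pattern_alt (n : Int) : String :=
  let st := (PySem.List.pyRange 1 (n+1) 1).foldl
    (fun (st : List String × String × String) i =>
      let asc := st.2.1 ++ PySem.Int.toStr i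
      let rows := st.1 ++ [String.ofList (List.replicate (n - i).toNat ' ') ++ asc ++ st.2.2 ++ "\n"]
      let desc := PySem.Int.toStr i ++ st.2.2
      (rows, asc, desc)) ([], "", "")
  PySem.Str.join "" st.1

-- ===== PRECONDITION & SPEC =====
def Spec_pyramid_pattern (n : Int) (out : String) : Prop := out = pyramid_pattern_alt n
instance (n : Int) (out : String) : Decidable (Spec_pyramid_pattern n out) := by unfold Spec_pyramid_pattern; infer_instance

-- ===== CLAIM =====
def Claim_equal_pyramid_pattern : Prop := ∀ (n : Int), Dom_pyramid_pattern n → Spec_pyramid_pattern n (pyramid_pattern n)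

-- ===== LEMMAS AND PROOFS =====
theorem join_empty_nil : PySem.Str.join "" ([] : List String) = "" := by
  rw [← String.toList_inj]; simp [PySem.Str.toList_join, PySem.Chars.join_nil]

theorem join_empty_cons (x : String) (xs : List String) :
    PySem.Str.join "" (x :: xs) = x ++ PySem.Str.join "" xs := by
  cases xs with
  | nil => rw [← String.toList_inj]; simp [PySem.Str.toList_join, PySem.Chars.join_singleton, PySem.Chars.join_nil]
  | cons y ys => rw [← String.toList_inj]; simp [PySem.Str.toList_join, PySem.Chars.join_cons_cons]

theorem join_empty_append (xs ys : List String) :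
    PySem.Str.join "" (xs ++ ys) = PySem.Str.join "" xs ++ PySem.Str.join "" ys := by
  induction xs with
  | nil => simp [join_empty_nil]
  | cons a t ih => simp [join_empty_cons, ih, String.append_assoc]

-- appending elementwise in a foldl is prepending the init to the joined pieces
theorem foldl_append_join {α : Type} (l : List α) (f : α → String) (s : String) :
    l.foldl (fun p x => p ++ f x) s = s ++ PySem.Str.join "" (l.map f) := by
  induction l generalizing s with
  | nil => simp [join_empty_nil]
  | cons a t ih => simp [List.foldl_cons, ih, join_empty_cons, String.append_assoc]

-- ascending digits "1 2 … i" and descending digits "i … 2 1"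
def ascStr (i : Int) : String := PySem.Str.join "" ((PySem.List.pyRange 1 (i+1) 1).map PySem.Int.toStr)
def dStr (i : Int) : String := PySem.Str.join "" ((PySem.List.pyRange i 0 (-1)).map PySem.Int.toStr)

-- the string A appends for row i
def rowA (n i : Int) : String :=
  String.ofList (List.replicate (n - i).toNat ' ') ++ ascStr i ++ dStr (i-1) ++ "\n"

theorem ascStr_succ (i : Int) (hi : 0 ≤ i) : ascStr (i+1) = ascStr i ++ PySem.Int.toStr (i+1) := by
  unfold ascStr
  rw [PySem.List.pyRange_one_succ_right (by omega : (1:Int) ≤ i+1)]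
  simp [join_empty_append, join_empty_cons, join_empty_nil]

theorem dStr_succ (i : Int) (hi : 0 ≤ i) : dStr (i+1) = PySem.Int.toStr (i+1) ++ dStr i := by
  unfold dStr
  rw [PySem.List.pyRange_neg_one_cons (by omega : (0:Int) < i+1)]
  simp [join_empty_cons]

-- A's result is the join of the rows
theorem pyramidA_eq_join (n : Int) :
    pyramid_pattern n = PySem.Str.join "" ((PySem.List.pyRange 1 (n+1) 1).map (rowA n)) := by
  unfold pyramid_pattern
  have hstep : (fun (pattern : String) (i : Int) =>
      let p1 := pattern ++ String.ofList (List.replicate (n - i).toNat ' ')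
      let p2 := (PySem.List.pyRange 1 (i+1) 1).foldl (fun p j => p ++ PySem.Int.toStr j) p1
      let p3 := (PySem.List.pyRange (i-1) 0 (-1)).foldl (fun p j => p ++ PySem.Int.toStr j) p2
      p3 ++ "\n") = fun pattern i => pattern ++ rowA n i := by
    funext pattern i
    simp [foldl_append_join, rowA, ascStr, dStr, String.append_assoc]
  rw [hstep, foldl_append_join, String.empty_append]

-- B's loop invariant: after the rows 1..k the state is (rows so far, asc of k, desc of k)
theorem stateB (n : Int) (k : Nat) :
    (PySem.List.pyRange 1 ((k : Int)+1) 1).foldl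
      (fun (st : List String × String × String) i =>
        let asc := st.2.1 ++ PySem.Int.toStr i
        let rows := st.1 ++ [String.ofList (List.replicate (n - i).toNat ' ') ++ asc ++ st.2.2 ++ "\n"]
        let desc := PySem.Int.toStr i ++ st.2.2
        (rows, asc, desc)) ([], "", "")
    = ((PySem.List.pyRange 1 ((k : Int)+1) 1).map (rowA n), ascStr k, dStr k) := by
  induction k with
  | zero =>
      rw [PySem.List.pyRange_one_eq_nil (by omega)]
      unfold ascStr dStr
      rw [PySem.List.pyRange_one_eq_nil (by omega), PySem.List.pyRange_neg_one_eq_nil (by omega)]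
      simp [join_empty_nil]
  | succ k ih =>
      have hcast : ((k+1 : Nat) : Int) = (k : Int) + 1 := by push_cast; ring
      rw [hcast, PySem.List.pyRange_one_succ_right (by omega : (1:Int) ≤ (k:Int)+1),
        List.foldl_append, List.map_append, ih]
      simp only [List.foldl_cons, List.foldl_nil, List.map_cons, List.map_nil]
      refine Prod.ext ?_ (Prod.ext ?_ ?_)
      · simp [rowA, ascStr_succ (k:Int) (by omega), String.append_assoc]
      · simp [ascStr_succ (k:Int) (by omega)]
      · simp [dStr_succ (k:Int) (by omega)]

theorem pyramid_eq (n : Int) : pyramid_pattern n = pyramid_pattern_alt n := by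
  rw [pyramidA_eq_join]
  unfold pyramid_pattern_alt
  by_cases h : n ≤ 0
  · rw [PySem.List.pyRange_one_eq_nil (by omega)]
    simp [join_empty_nil]
  · have hn : n = ((n.toNat : Nat) : Int) := by omega
    rw [hn, stateB]

-- ===== VERDICT =====
theorem pyramid_pattern_spec : Claim_equal_pyramid_pattern := by
  intro n _
  unfold Spec_pyramid_pattern
  exact pyramid_eq n
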